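-- pv_equiv track=rewrite | github.com/kiharalab/CryoREAD | graph/structure_utils.py | build_clusters_advanced
-- ===== SOURCE A (Python) =====
-- from collections import defaultdict
--
-- def build_clusters_advanced(all_starting_index_keys,all_seq_indexes):
--     all_starting_index_keys.sort()
--     cluster_dict=defaultdict(list)
--     cluster_id=0
--     prev_index = all_starting_index_keys[0]
--     cluster_dict[cluster_id].append(prev_index)
--     for k in range(1,len(all_starting_index_keys)):
--         current_index = all_starting_index_keys[k]
--         prev_seq_length = all_seq_indexes[k-1]
--         if prev_index+prev_seq_length>current_index:
--             cluster_dict[cluster_id].append(current_index)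
--         else:
--             cluster_id+=1
--             cluster_dict[cluster_id].append(current_index)
--         prev_index = current_index
--     return cluster_dict
-- ===== SOURCE B (Python) =====
-- from collections import defaultdict
--
-- def build_clusters_advanced(all_starting_index_keys, all_seq_indexes):
--     all_starting_index_keys.sort()
--     keys = all_starting_index_keys
--     n = len(keys)
--     # cut positions: a new cluster starts at k when the previous entry does not overlap it
--     cuts = [0] + [k for k in range(1, n)
--                   if keys[k - 1] + all_seq_indexes[k - 1] <= keys[k]] + [n]
--     cluster_dict = defaultdict(list)
--     for cid, (a, b) in enumerate(zip(cuts, cuts[1:])):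
--         cluster_dict[cid] = keys[a:b]
--     return cluster_dict
-- ===== Notes on version B (the rewrite author's own statement) =====
-- stated objective: alternative
-- what changed: Replaces A's stateful element-by-element pass (running cluster id, prev_index, per-element dict appends) with a cut-then-slice scheme: a comprehension computes the cluster boundary positions, then each cluster is produced as a single slice of the sorted list assigned to its id.
import Mathlib
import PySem

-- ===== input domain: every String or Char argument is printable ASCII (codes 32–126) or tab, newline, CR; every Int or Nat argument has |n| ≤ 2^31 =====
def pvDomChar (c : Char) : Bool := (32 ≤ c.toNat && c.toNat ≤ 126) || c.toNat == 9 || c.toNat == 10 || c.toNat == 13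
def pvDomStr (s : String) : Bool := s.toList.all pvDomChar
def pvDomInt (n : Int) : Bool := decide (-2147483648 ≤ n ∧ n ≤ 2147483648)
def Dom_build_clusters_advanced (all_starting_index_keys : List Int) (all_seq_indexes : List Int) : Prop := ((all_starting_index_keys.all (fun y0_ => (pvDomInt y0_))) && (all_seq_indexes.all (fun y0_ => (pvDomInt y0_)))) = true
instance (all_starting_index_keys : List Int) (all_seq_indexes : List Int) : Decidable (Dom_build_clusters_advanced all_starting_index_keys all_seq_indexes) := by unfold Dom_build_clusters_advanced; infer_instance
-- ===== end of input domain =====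

-- B replaces A's stateful element-by-element pass (running cluster id / prev_index / per-element
-- appends) with a cut-then-slice scheme: compute the cluster boundary positions, then assign each
-- cluster as one slice. Equal return value proved; NOTE: both A and B sort the first argument
-- IN PLACE — the theorems are about the return value.

-- ===== PORT A =====
-- one loop iteration of A: state = (cluster_dict, cluster_id, prev_index)
def pvStepA (s ss : List Int) (st : PySem.Dict Int (List Int) × Int × Int) (k : Int) :
    PySem.Dict Int (List Int) × Int × Int :=
  let cur := PySem.List.pyGetD s k 0            -- all_starting_index_keys[k]
  let prevSeq := PySem.List.pyGetD ss (k - 1) 0 -- all_seq_indexes[k-1]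
  if st.2.2 + prevSeq > cur then
    (st.1.modify st.2.1 [] (fun l => l ++ [cur]), st.2.1, cur)
  else
    (st.1.modify (st.2.1 + 1) [] (fun l => l ++ [cur]), st.2.1 + 1, cur)

def build_clusters_advanced (all_starting_index_keys : List Int) (all_seq_indexes : List Int) : List (Int × List Int) :=
  let s := PySem.List.sorted all_starting_index_keys (fun x => x) false
  match s with
  | [] => []   -- Python raises IndexError here (all_starting_index_keys[0]); excluded by Pre_
  | s0 :: _ =>
    ((PySem.List.pyRange 1 (s.length : Int)).foldl (pvStepA s all_seq_indexes)
      ((PySem.Dict.empty).modify 0 [] (fun l => l ++ [s0]), 0, s0)).1.items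

-- ===== PORT B =====
def build_clusters_advanced_alt (all_starting_index_keys : List Int) (all_seq_indexes : List Int) : List (Int × List Int) :=
  let s := PySem.List.sorted all_starting_index_keys (fun x => x) false
  let n := s.length
  -- cuts = [0] + [k for k in range(1, n) if keys[k-1] + all_seq_indexes[k-1] <= keys[k]] + [n]
  let cuts : List Int := [0] ++ (PySem.List.pyRange 1 (n : Int)).filter
      (fun k => decide (PySem.List.pyGetD s (k - 1) 0 + PySem.List.pyGetD all_seq_indexes (k - 1) 0
                          ≤ PySem.List.pyGetD s k 0)) ++ [(n : Int)]
  -- for cid, (a, b) in enumerate(zip(cuts, cuts[1:])): cluster_dict[cid] = keys[a:b]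
  ((PySem.List.enumerate (cuts.zip cuts.tail) 0).foldl
      (fun d p => d.insert p.1 (PySem.List.slice s (some p.2.1) (some p.2.2)))
      PySem.Dict.empty).items

-- ===== PRECONDITION & SPEC =====
-- Pre_ excludes exactly the inputs where Python A raises IndexError: an empty key list
-- (all_starting_index_keys[0]) or fewer than len(keys)-1 sequence lengths (all_seq_indexes[k-1]).
def Pre_build_clusters_advanced (all_starting_index_keys : List Int) (all_seq_indexes : List Int) : Prop :=
  all_starting_index_keys ≠ [] ∧ all_starting_index_keys.length ≤ all_seq_indexes.length + 1
instance (all_starting_index_keys : List Int) (all_seq_indexes : List Int) : Decidable (Pre_build_clusters_advanced all_starting_index_keys all_seq_indexes) := by unfold Pre_build_clusters_advanced; infer_instance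

def pvWitness_build_clusters_advanced : List Int × List Int := ([3, 0], [2, 5])

def Spec_build_clusters_advanced (all_starting_index_keys : List Int) (all_seq_indexes : List Int) (out : List (Int × List Int)) : Prop := out = build_clusters_advanced_alt all_starting_index_keys all_seq_indexes
instance (all_starting_index_keys : List Int) (all_seq_indexes : List Int) (out : List (Int × List Int)) : Decidable (Spec_build_clusters_advanced all_starting_index_keys all_seq_indexes out) := by unfold Spec_build_clusters_advanced; infer_instance

-- ===== CLAIM (what is proved, stated in full; the proofs are below) =====
def Claim_equal_build_clusters_advanced : Prop := ∀ (all_starting_index_keys : List Int) (all_seq_indexes : List Int), Dom_build_clusters_advanced all_starting_index_keys all_seq_indexes → Pre_build_clusters_advanced all_starting_index_keys all_seq_indexes → Spec_build_clusters_advanced all_starting_index_keys all_seq_indexes (build_clusters_advanced all_starting_index_keys all_seq_indexes)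

-- ===== LEMMAS AND PROOFS =====

-- Nat → Int cast as a named function (keeps rewriting predictable)
def pvCast (k : Nat) : Int := k

-- a cluster starts at position k (k ≥ 1) iff the previous entry does not overlap it
def pvBrk (s ss : List Int) (k : Nat) : Bool :=
  decide (s.getD (k - 1) 0 + ss.getD (k - 1) 0 ≤ s.getD k 0)

-- break positions strictly below m
def pvBk (s ss : List Int) (m : Nat) : List Nat := (List.range' 1 (m - 1)).filter (pvBrk s ss)

-- the segment decomposition: clusters c, c+1, … with boundaries st, bks…, e
def pvSeg (s : List Int) : Int → Nat → List Nat → Nat → List (Int × List Int)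
  | c, st, [], e => [(c, (s.drop st).take (e - st))]
  | c, st, b :: bs, e => (c, (s.drop st).take (b - st)) :: pvSeg s (c + 1) b bs e

theorem pvSeg_contains_last (s : List Int) (bks : List Nat) : ∀ (c : Int) (st e : Nat),
    (PySem.Dict.mk (pvSeg s c st bks e)).contains (c + (bks.length : Int)) = true := by
  induction bks with
  | nil => intro c st e; simp [pvSeg, PySem.Dict.contains_mk]
  | cons b bs ih =>
    intro c st e
    simp only [pvSeg, PySem.Dict.contains_mk, List.any_cons]
    have := ih (c + 1) b e
    rw [PySem.Dict.contains_mk] at this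
    have h2 : c + ((b :: bs).length : Int) = (c + 1) + (bs.length : Int) := by
      push_cast [List.length_cons]; ring
    rw [h2, this, Bool.or_true]

theorem pvSeg_contains_gt (s : List Int) (bks : List Nat) : ∀ (c : Int) (st e : Nat) (k : Int),
    c + (bks.length : Int) < k → (PySem.Dict.mk (pvSeg s c st bks e)).contains k = false := by
  induction bks with
  | nil =>
    intro c st e k hk
    simp [pvSeg, PySem.Dict.contains_mk]
    omega
  | cons b bs ih =>
    intro c st e k hk
    simp only [pvSeg, PySem.Dict.contains_mk, List.any_cons]
    have := ih (c + 1) b e k (by push_cast [List.length_cons] at hk ⊢; omega)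
    rw [PySem.Dict.contains_mk] at this
    rw [this]
    have : (c == k) = false := by simp; push_cast [List.length_cons] at hk; omega
    simp [this]

theorem pvSeg_append (s : List Int) (bks : List Nat) : ∀ (c : Int) (st : Nat) (b' e' : Nat),
    pvSeg s c st (bks ++ [b']) e'
      = pvSeg s c st bks b' ++ [(c + (bks.length : Int) + 1, (s.drop b').take (e' - b'))] := by
  induction bks with
  | nil => intro c st b' e'; simp [pvSeg]
  | cons b bs ih =>
    intro c st b' e'
    simp only [List.cons_append, pvSeg, ih (c + 1) b b' e', List.length_cons]
    have hc : c + ((bs.length + 1 : Nat) : Int) + 1 = c + 1 + (bs.length : Int) + 1 := by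
      push_cast; ring
    rw [hc]

-- A's new-cluster branch: a fresh key appends a fresh one-element segment
theorem pvSeg_modify_new (s : List Int) (bks : List Nat) (c : Int) (st e : Nat)
    (he : e < s.length) :
    (PySem.Dict.mk (pvSeg s c st bks e)).modify (c + (bks.length : Int) + 1) []
        (fun l => l ++ [s.getD e 0])
      = PySem.Dict.mk (pvSeg s c st (bks ++ [e]) (e + 1)) := by
  have hcont := pvSeg_contains_gt s bks c st e (c + (bks.length : Int) + 1) (by omega)
  rw [PySem.Dict.modify, PySem.Dict.getD_of_not_contains _ _ hcont, PySem.Dict.insert, hcont]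
  simp only [Bool.false_eq_true, if_false, List.nil_append]
  rw [pvSeg_append]
  have hseg : (s.drop e).take (e + 1 - e) = [s.getD e 0] := by
    rw [show e + 1 - e = 1 by omega, List.drop_eq_getElem_cons he, List.take_succ_cons,
      List.take_zero]
    simp [List.getD_eq_getElem?_getD, List.getElem?_eq_getElem he]
  rw [hseg]

-- A's overlap branch: appending s[e] to the last cluster extends the last segment by one
theorem pvSeg_modify_last (s : List Int) (bks : List Nat) : ∀ (c : Int) (st e : Nat),
    st ≤ e → (∀ b ∈ bks, b ≤ e) → e < s.length →
    (PySem.Dict.mk (pvSeg s c st bks e)).modify (c + (bks.length : Int)) []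
        (fun l => l ++ [s.getD e 0])
      = PySem.Dict.mk (pvSeg s c st bks (e + 1)) := by
  induction bks with
  | nil =>
    intro c st e hst _ he
    simp only [pvSeg, List.length_nil, Nat.cast_zero, add_zero]
    rw [PySem.Dict.modify, PySem.Dict.getD_eq_get?_getD]
    have hc : (PySem.Dict.mk [(c, (s.drop st).take (e - st))]).contains c = true := by
      simp [PySem.Dict.contains_mk]
    rw [PySem.Dict.insert, hc]
    simp only [if_true, PySem.Dict.get?_mk_cons, BEq.refl, List.map_cons, List.map_nil,
      Option.getD_some, PySem.Dict.mk.injEq]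
    have hext : (s.drop st).take (e - st) ++ [s.getD e 0] = (s.drop st).take (e + 1 - st) := by
      have h1 : e + 1 - st = (e - st) + 1 := by omega
      rw [h1, List.take_add_one]
      congr 1
      have hidx : st + (e - st) = e := by omega
      rw [List.getElem?_drop, hidx, List.getElem?_eq_getElem he]
      simp [List.getD_eq_getElem?_getD, List.getElem?_eq_getElem he]
    rw [List.getD_eq_getElem?_getD] at hext
    simp [hext]
  | cons b bs ih =>
    intro c st e hst hb he
    have hk : c + (((b :: bs).length : Nat) : Int) = (c + 1) + (bs.length : Int) := by
      push_cast [List.length_cons]; ring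
    set L := pvSeg s (c + 1) b bs e with hL
    have hcsub : (PySem.Dict.mk L).contains ((c + 1) + (bs.length : Int)) = true :=
      pvSeg_contains_last s bs (c + 1) b e
    have hcne : (c == (c + 1) + (bs.length : Int)) = false := by simp; omega
    -- reduce the IH to a statement about the mapped list
    have ihr := ih (c + 1) b e (hb b (by simp)) (fun x hx => hb x (by simp [hx])) he
    rw [PySem.Dict.modify, PySem.Dict.insert, hcsub] at ihr
    simp only [if_true] at ihr
    have ihlist := congrArg PySem.Dict.items ihr
    have ihlist := ihlist
    -- now the main goal
    simp only [pvSeg, ← hL, hk]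
    rw [PySem.Dict.modify, PySem.Dict.insert]
    have hcont : (PySem.Dict.mk ((c, (s.drop st).take (b - st)) :: L)).contains
        ((c + 1) + (bs.length : Int)) = true := by
      simp only [PySem.Dict.contains_mk, List.any_cons, hcne, Bool.false_or]
      rw [PySem.Dict.contains_mk] at hcsub
      exact hcsub
    rw [hcont]
    simp only [if_true, List.map_cons, hcne, Bool.false_eq_true, if_false]
    have hget : (PySem.Dict.mk ((c, (s.drop st).take (b - st)) :: L)).getD
        ((c + 1) + (bs.length : Int)) []
        = (PySem.Dict.mk L).getD ((c + 1) + (bs.length : Int)) [] := by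
      rw [PySem.Dict.getD_eq_get?_getD, PySem.Dict.getD_eq_get?_getD,
        PySem.Dict.get?_mk_cons, hcne]
      simp
    rw [hget, PySem.Dict.mk.injEq]
    simp only [List.cons.injEq]
    exact ⟨trivial, ihlist⟩

-- loop invariant for A: after the first m keys the state is the segment decomposition of s.take m
theorem pv_invariantA (s ss : List Int) (s0 : Int) (t : List Int) (hs : s = s0 :: t) :
    ∀ (m : Nat), 1 ≤ m → m ≤ s.length →
    (PySem.List.pyRange 1 (m : Int)).foldl (pvStepA s ss)
        ((PySem.Dict.empty).modify 0 [] (fun l => l ++ [s0]), 0, s0)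
      = (PySem.Dict.mk (pvSeg s 0 0 (pvBk s ss m) m), ((pvBk s ss m).length : Int),
         s.getD (m - 1) 0) := by
  intro m
  induction m with
  | zero => omega
  | succ n ih =>
    intro h1 hm
    rcases Nat.eq_or_lt_of_le h1 with h | h
    · -- base case m = 1
      have hn0 : n = 0 := by omega
      subst hn0
      rw [show ((0 + 1 : Nat) : Int) = 1 by norm_num, PySem.List.pyRange_one_eq_nil le_rfl]
      simp only [List.foldl_nil]
      have hinit : (PySem.Dict.empty : PySem.Dict Int (List Int)).modify 0 [] (fun l => l ++ [s0])
          = PySem.Dict.mk [(0, [s0])] := by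
        rw [PySem.Dict.modify, PySem.Dict.getD_of_not_contains _ _ (by simp), PySem.Dict.insert]
        simp [PySem.Dict.empty]
      rw [hinit]
      have hbk : pvBk s ss 1 = [] := by simp [pvBk]
      rw [hbk]
      simp [pvSeg, hs]
    · -- step: n ≥ 1
      have hn1 : 1 ≤ n := by omega
      have hlt : n < s.length := by omega
      have ihh := ih hn1 (by omega)
      rw [show ((n + 1 : Nat) : Int) = (n : Int) + 1 by push_cast; ring,
        PySem.List.pyRange_one_succ_right (by exact_mod_cast hn1), List.foldl_append, ihh]
      simp only [List.foldl_cons, List.foldl_nil]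
      have hcur : PySem.List.pyGetD s ((n : Nat) : Int) 0 = s.getD n 0 := by
        simp [PySem.List.pyGetD_natCast]
      have hprev : PySem.List.pyGetD ss (((n : Nat) : Int) - 1) 0 = ss.getD (n - 1) 0 := by
        rw [show ((n : Nat) : Int) - 1 = ((n - 1 : Nat) : Int) by omega]
        simp [PySem.List.pyGetD_natCast]
      have hrange : List.range' 1 (n + 1 - 1) = List.range' 1 (n - 1) ++ [n] := by
        rw [show n + 1 - 1 = (n - 1) + 1 by omega, List.range'_concat]
        congr 1
        simp
        omega
      have hble : ∀ b ∈ pvBk s ss n, b ≤ n := by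
        intro b hb
        have hmem := List.mem_of_mem_filter hb
        have := List.mem_range'_1.mp hmem
        omega
      simp only [pvStepA, hcur, hprev]
      by_cases hgt : s.getD (n - 1) 0 + ss.getD (n - 1) 0 > s.getD n 0
      · -- overlap: same cluster
        have hbrk : pvBrk s ss n = false := by
          simp only [pvBrk, decide_eq_false_iff_not]; omega
        have hbk : pvBk s ss (n + 1) = pvBk s ss n := by
          unfold pvBk
          rw [hrange, List.filter_append]
          simp [hbrk]
        rw [if_pos hgt]
        have hmod := pvSeg_modify_last s (pvBk s ss n) 0 0 n (by omega) hble hlt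
        rw [zero_add] at hmod
        rw [hbk, hmod]
        simp
      · -- new cluster
        have hbrk : pvBrk s ss n = true := by
          simp only [pvBrk, decide_eq_true_eq]; omega
        have hbk : pvBk s ss (n + 1) = pvBk s ss n ++ [n] := by
          unfold pvBk
          rw [hrange, List.filter_append]
          simp [hbrk]
        rw [if_neg hgt]
        have hmod := pvSeg_modify_new s (pvBk s ss n) 0 0 n hlt
        rw [zero_add] at hmod
        rw [hbk, hmod]
        simp only [Prod.mk.injEq]
        refine ⟨trivial, ?_, ?_⟩
        · simp
        · simp

-- range(1, n) is the cast of the Nat range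
theorem pv_pyRange_one (n : Nat) :
    PySem.List.pyRange 1 (n : Int) = (List.range' 1 (n - 1)).map pvCast := by
  induction n with
  | zero => simp [PySem.List.pyRange_one_eq_nil]
  | succ m ih =>
    rcases Nat.eq_zero_or_pos m with h | h
    · subst h; simp [PySem.List.pyRange_one_eq_nil]
    · rw [show ((m + 1 : Nat) : Int) = (m : Int) + 1 by push_cast; ring,
        PySem.List.pyRange_one_succ_right (by exact_mod_cast h), ih]
      rw [show (m + 1 - 1) = (m - 1) + 1 by omega, List.range'_concat]
      simp [pvCast]
      omega

-- enumerate over a mapped list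
theorem pv_enumerate_map {α β : Type} (l : List α) (g : α → β) : ∀ (c : Int),
    PySem.List.enumerate (l.map g) c = (PySem.List.enumerate l c).map (fun p => (p.1, g p.2)) := by
  induction l with
  | nil => intro c; simp [PySem.List.enumerate_nil]
  | cons x xs ih => intro c; simp [PySem.List.enumerate_cons, ih]

-- B's slice loop over Nat-level cut pairs is the segment decomposition
theorem pv_seg_of_cuts (s : List Int) (e : Nat) (bks : List Nat) : ∀ (st : Nat) (c : Int),
    (PySem.List.enumerate ((st :: (bks ++ [e])).zip (bks ++ [e])) c).map
        (fun p => (p.1, (s.drop p.2.1).take (p.2.2 - p.2.1)))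
      = pvSeg s c st bks e := by
  induction bks with
  | nil => intro st c; simp [PySem.List.enumerate_cons, PySem.List.enumerate_nil, pvSeg]
  | cons b bs ih =>
    intro st c
    simp only [List.cons_append, List.zip_cons_cons, PySem.List.enumerate_cons, List.map_cons,
      pvSeg]
    rw [ih b (c + 1)]

-- the predicate B filters range(1, n) with, reduced to pvBrk
theorem pv_filter_cuts (s ss : List Int) :
    (PySem.List.pyRange 1 (s.length : Int)).filter
        (fun k => decide (PySem.List.pyGetD s (k - 1) 0 + PySem.List.pyGetD ss (k - 1) 0
            ≤ PySem.List.pyGetD s k 0))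
      = (pvBk s ss s.length).map pvCast := by
  rw [pv_pyRange_one, List.filter_map]
  unfold pvBk
  refine congrArg (List.map _) (List.filter_congr ?_)
  intro j hj
  have hj1 : 1 ≤ j := (List.mem_range'_1.mp hj).1
  simp only [Function.comp, pvCast]
  simp only [show ((j : Nat) : Int) - 1 = ((j - 1 : Nat) : Int) from by omega,
    PySem.List.pyGetD_natCast, pvBrk]

-- B's insert loop over the cast cut list yields the segment decomposition
theorem pv_altB (s : List Int) (mid : List Nat)
    (cuts : List Int) (hcuts : cuts = (0 :: (mid ++ [s.length])).map pvCast) :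
    ((PySem.List.enumerate (cuts.zip cuts.tail) 0).foldl
        (fun d p => d.insert p.1 (PySem.List.slice s (some p.2.1) (some p.2.2)))
        PySem.Dict.empty).items
      = pvSeg s 0 0 mid s.length := by
  subst hcuts
  rw [show ((0 :: (mid ++ [s.length])).map pvCast).tail
      = ((mid ++ [s.length]).map pvCast) by simp]
  rw [List.zip_map, pv_enumerate_map]
  set L := (PySem.List.enumerate ((0 :: (mid ++ [s.length])).zip (mid ++ [s.length])) 0).map
      (fun p => (p.1, Prod.map pvCast pvCast p.2)) with hL
  have hnodup : (L.map (fun p : Int × Int × Int => p.1)).Nodup := by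
    rw [hL, List.map_map]
    have hp := PySem.List.pairwise_lt_enumerate
      ((0 :: (mid ++ [s.length])).zip (mid ++ [s.length])) 0
    exact List.pairwise_map.mpr (hp.imp (fun h => ne_of_lt h))
  have hfresh : (L.foldl (fun d p => d.insert p.1 (PySem.List.slice s (some p.2.1) (some p.2.2)))
        PySem.Dict.empty).items
      = PySem.Dict.empty.items ++ L.map
          (fun p => (p.1, PySem.List.slice s (some p.2.1) (some p.2.2))) :=
    PySem.Dict.items_foldl_insert_fresh L (fun p => p.1)
      (fun p => PySem.List.slice s (some p.2.1) (some p.2.2)) PySem.Dict.empty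
      (fun a _ => by simp [PySem.Dict.contains_empty]) hnodup
  rw [hfresh, hL]
  rw [List.map_map, show PySem.Dict.empty.items = ([] : List (Int × List Int)) from rfl,
    List.nil_append, ← pv_seg_of_cuts s s.length mid 0 0]
  apply List.map_congr_left
  intro p _
  simp [Function.comp, Prod.map, pvCast, PySem.List.slice_natCast]

-- ===== VERDICT (by name: the statement is the Claim_ definition above) =====
theorem build_clusters_advanced_spec : Claim_equal_build_clusters_advanced := by
  unfold Claim_equal_build_clusters_advanced
  intro ks ss _ hpre
  unfold Spec_build_clusters_advanced
  unfold build_clusters_advanced build_clusters_advanced_alt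
  obtain ⟨hne, -⟩ := hpre
  have hslen : (PySem.List.sorted ks (fun x => x) false).length = ks.length :=
    (PySem.List.sorted_perm ks (fun x => x) false).length_eq
  set s := PySem.List.sorted ks (fun x => x) false with hsdef
  have hsne : s ≠ [] := by
    intro h; apply hne
    rw [h] at hslen
    exact List.length_eq_zero_iff.mp hslen.symm
  obtain ⟨s0, t, hs⟩ := List.exists_cons_of_ne_nil hsne
  have h1 : 1 ≤ s.length := by rw [hs]; simp
  have hfold := pv_invariantA s ss s0 t hs s.length h1 le_rfl
  have hB := pv_altB s (pvBk s ss s.length)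
      ([0] ++ (PySem.List.pyRange 1 (s.length : Int)).filter
          (fun k => decide (PySem.List.pyGetD s (k - 1) 0 + PySem.List.pyGetD ss (k - 1) 0
              ≤ PySem.List.pyGetD s k 0)) ++ [(s.length : Int)])
      (by rw [pv_filter_cuts]; simp [pvCast])
  rw [hs]
  simp only [← hs, hfold]
  rw [← hB]
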